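-- pv_equiv track=rewrite | github.com/mgomezpaz/ABLA | utils/image_processing_pipelines/bacteria_centroid_pipeline.py | get_sequence_boundaries
-- ===== SOURCE A (Python) =====
-- def get_sequence_boundaries(entropy_dict):
--     """
--     Identifies boundaries of consecutive sequences in entropy data.
--     Used to determine where significant changes in entropy occur.
--
--     Args:
--         entropy_dict: Dictionary of entropy values by slice index
--
--     Returns:
--         tuple: (first_sequence_max, second_sequence_min) Boundary indices
--               None values indicate no boundary found
--     """
--     # Sort slice indices for sequential analysis
--     sorted_keys = sorted(entropy_dict.keys())
--     sequences = []
--     current_sequence = [sorted_keys[0]]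
--
--     # Group consecutive indices into sequences
--     for i in range(1, len(sorted_keys)):
--         if sorted_keys[i] == sorted_keys[i - 1] + 1:
--             current_sequence.append(sorted_keys[i])
--         else:
--             sequences.append(current_sequence)
--             current_sequence = [sorted_keys[i]]
--
--     # Add final sequence if exists
--     if current_sequence:
--         sequences.append(current_sequence)
--
--     # Initialize boundary values
--     first_sequence_max = None
--     second_sequence_min = None
--
--     if sequences:
--         # Determine sequence type based on starting index
--         if sequences[0][0] <= 10:  # First sequence starts near beginning
--             first_sequence_max = sequences[0][-1]
--         else:  # First sequence starts later
--             second_sequence_min = sequences[0][0]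
--
--         # Handle second sequence if it exists
--         if len(sequences) > 1:
--             if second_sequence_min is None:
--                 second_sequence_min = sequences[1][0]
--             else:
--                 second_sequence_min = sequences[1][0]
--
--     return first_sequence_max, second_sequence_min
-- ===== SOURCE B (Python) =====
-- def get_sequence_boundaries(entropy_dict):
--     # O(n): hash-set walk instead of sort + grouping.
--     keys = set(entropy_dict)
--     m = min(keys)
--     e = m
--     while e + 1 in keys:
--         e += 1
--     first_sequence_max = e if m <= 10 else None
--     later = [k for k in keys if k > e]
--     if later:
--         second_sequence_min = min(later)
--     else:
--         second_sequence_min = m if m > 10 else None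
--     return first_sequence_max, second_sequence_min
-- ===== Notes on version B (the rewrite author's own statement) =====
-- stated objective: faster
-- what changed: Replaces sort-then-group-into-runs with an O(n) hash-set walk: take the minimum key, extend it upward through consecutive members to find the first run's end, and take the minimum key beyond that end as the second run's start.
import Mathlib
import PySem

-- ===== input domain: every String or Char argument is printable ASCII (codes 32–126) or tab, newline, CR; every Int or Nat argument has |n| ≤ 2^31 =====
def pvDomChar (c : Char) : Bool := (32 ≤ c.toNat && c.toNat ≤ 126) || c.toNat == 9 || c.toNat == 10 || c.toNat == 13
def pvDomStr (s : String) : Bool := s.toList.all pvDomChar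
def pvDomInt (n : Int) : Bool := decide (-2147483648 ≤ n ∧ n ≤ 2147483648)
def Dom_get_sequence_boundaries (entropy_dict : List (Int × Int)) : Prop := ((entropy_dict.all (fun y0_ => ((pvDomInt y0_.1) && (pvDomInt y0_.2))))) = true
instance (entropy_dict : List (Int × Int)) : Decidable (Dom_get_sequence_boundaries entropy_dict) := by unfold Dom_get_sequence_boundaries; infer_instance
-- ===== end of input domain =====

-- ===== PORT A =====
-- B replaces A's sort-and-group-runs scan with an O(n) hash-set walk (objective: faster).
-- loop "for i in range(1, len(sorted_keys))": state = (sequences, current_sequence), prev = sorted_keys[i-1]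
def pvGSB_aloop : List Int → List (List Int) → List Int → Int → List (List Int) × List Int
  | [], seqs, cur, _ => (seqs, cur)
  | k :: rest, seqs, cur, prev =>
    if k = prev + 1 then pvGSB_aloop rest seqs (cur ++ [k]) k
    else pvGSB_aloop rest (seqs ++ [cur]) [k] k

def get_sequence_boundaries (entropy_dict : List (Int × Int)) : Option Int × Option Int :=
  match PySem.List.sorted (PySem.Dict.mk entropy_dict).keys (fun x => x) false with
  | [] => (none, none)  -- unreachable under Pre_: sorted_keys[0] raises IndexError on the empty dict
  | x :: rest =>
    let p := pvGSB_aloop rest [] [x] x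
    let sequences := p.1 ++ [p.2]  -- "if current_sequence:" is always true: current_sequence is nonempty
    let s0 := sequences.headD []
    let first_sequence_max : Option Int := if s0.headD 0 ≤ 10 then some (s0.getLastD 0) else none
    let second_sequence_min : Option Int :=
      if sequences.length > 1 then some ((sequences.getD 1 []).headD 0)
      else if s0.headD 0 ≤ 10 then none else some (s0.headD 0)
    (first_sequence_max, second_sequence_min)

-- ===== PORT B =====
-- "while e + 1 in keys: e += 1"; fuel len(keys) suffices: each step reaches a distinct member of keys
def pvGSB_walk (keys : List Int) : Nat → Int → Int
  | 0, e => e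
  | n + 1, e => if (e + 1) ∈ keys then pvGSB_walk keys n (e + 1) else e

def get_sequence_boundaries_alt (entropy_dict : List (Int × Int)) : Option Int × Option Int :=
  let keys : PySem.Set Int := PySem.Set.ofList (entropy_dict.map Prod.fst)
  match PySem.List.min? keys (fun x => x) with
  | none => (none, none)  -- unreachable under Pre_: min() raises ValueError on the empty set
  | some m =>
    let e := pvGSB_walk keys keys.length m
    let first_sequence_max : Option Int := if m ≤ 10 then some e else none
    let later := keys.filter (fun k => decide (e < k))
    let second_sequence_min : Option Int :=
      match PySem.List.min? later (fun x => x) with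
      | some v => some v
      | none => if 10 < m then some m else none
    (first_sequence_max, second_sequence_min)

-- ===== PRECONDITION & SPEC =====
-- Pre_ excludes the empty dict (Python A raises IndexError there, B raises ValueError) and assoc
-- lists with duplicate keys, which do not represent any Python dict (dict keys are unique).
def Pre_get_sequence_boundaries (entropy_dict : List (Int × Int)) : Prop :=
  entropy_dict ≠ [] ∧ (entropy_dict.map Prod.fst).Nodup
instance (entropy_dict : List (Int × Int)) : Decidable (Pre_get_sequence_boundaries entropy_dict) := by
  unfold Pre_get_sequence_boundaries; infer_instance
def pvWitness_get_sequence_boundaries : (List (Int × Int)) := [(0, 5), (1, 7), (14, 2)]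

def Spec_get_sequence_boundaries (entropy_dict : List (Int × Int)) (out : Option Int × Option Int) : Prop := out = get_sequence_boundaries_alt entropy_dict
instance (entropy_dict : List (Int × Int)) (out : Option Int × Option Int) : Decidable (Spec_get_sequence_boundaries entropy_dict out) := by unfold Spec_get_sequence_boundaries; infer_instance

-- ===== CLAIM (what is proved, stated in full; the proofs are below) =====
def Claim_equal_get_sequence_boundaries : Prop := ∀ (entropy_dict : List (Int × Int)), Dom_get_sequence_boundaries entropy_dict → Pre_get_sequence_boundaries entropy_dict → Spec_get_sequence_boundaries entropy_dict (get_sequence_boundaries entropy_dict)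

-- ===== LEMMAS AND PROOFS =====

-- specification-side view of A's grouping: the maximal consecutive run starting at x, and the rest
def pvRun : Int → List Int → List Int × List Int
  | x, [] => ([x], [])
  | x, y :: ys => if y = x + 1 then ((pvRun y ys).1.cons x |> fun r => (r, (pvRun y ys).2)) else ([x], y :: ys)

lemma pvRun_snd_length_le : ∀ (ys : List Int) (x : Int), (pvRun x ys).2.length ≤ ys.length := by
  intro ys
  induction ys with
  | nil => intro x; simp [pvRun]
  | cons y ys ih =>
    intro x
    by_cases h : y = x + 1 <;> simp [pvRun, h]
    subst h; exact le_trans (ih _) (Nat.le_succ _)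

def pvRuns : List Int → List (List Int)
  | [] => []
  | x :: xs => (pvRun x xs).1 :: pvRuns (pvRun x xs).2
termination_by l => l.length
decreasing_by
  simpa using Nat.lt_succ_of_le (pvRun_snd_length_le xs x)

lemma pvGSB_aloop_spec : ∀ (rest : List Int) (seqs : List (List Int)) (cur : List Int) (x : Int),
    (pvGSB_aloop rest seqs (cur ++ [x]) x).1 ++ [(pvGSB_aloop rest seqs (cur ++ [x]) x).2] =
      seqs ++ (cur ++ (pvRun x rest).1) :: pvRuns (pvRun x rest).2 := by
  intro rest
  induction rest with
  | nil => intro seqs cur x; simp [pvGSB_aloop, pvRun, pvRuns]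
  | cons y ys ih =>
    intro seqs cur x
    by_cases h : y = x + 1
    · have h1 := ih seqs (cur ++ [x]) y
      simp only [pvGSB_aloop, pvRun, if_pos h, List.append_assoc] at *
      subst h
      simpa using h1
    · have h1 := ih (seqs ++ [cur ++ [x]]) [] y
      simp only [pvGSB_aloop, pvRun, if_neg h, List.nil_append, List.append_assoc] at *
      rw [h1]
      rw [pvRuns]
      simp

lemma pvRun_spec : ∀ (rest : List Int) (x : Int), (x :: rest).Pairwise (· < ·) →
    (x :: rest = (pvRun x rest).1 ++ (pvRun x rest).2) ∧
    (∀ k : Int, k ∈ (pvRun x rest).1 ↔ x ≤ k ∧ k < x + (pvRun x rest).1.length) ∧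
    (∀ k ∈ (pvRun x rest).2, x + ((pvRun x rest).1.length : Int) < k) ∧
    ((pvRun x rest).1.getLastD 0 = x + ((pvRun x rest).1.length : Int) - 1) ∧
    (∃ t, (pvRun x rest).1 = x :: t) := by
  intro rest
  induction rest with
  | nil =>
    intro x _
    refine ⟨by simp [pvRun], ?_, by simp [pvRun], by simp [pvRun], ⟨[], by simp [pvRun]⟩⟩
    intro k; simp [pvRun]; omega
  | cons y ys ih =>
    intro x hp
    have hxy : x < y := (List.pairwise_cons.1 hp).1 y (by simp)
    have hp' : (y :: ys).Pairwise (· < ·) := (List.pairwise_cons.1 hp).2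
    by_cases h : y = x + 1
    · obtain ⟨e1, e2, e3, e4, t, ht⟩ := ih y hp'
      subst h
      have hr : pvRun x ((x + 1) :: ys) = (x :: (pvRun (x + 1) ys).1, (pvRun (x + 1) ys).2) := by
        simp [pvRun]
      rw [hr]
      refine ⟨by rw [e1]; simp, ?_, ?_, ?_, ⟨(pvRun (x + 1) ys).1, rfl⟩⟩
      · intro k
        simp only [List.mem_cons, e2 k, List.length_cons]
        push_cast
        omega
      · intro k hk
        have := e3 k hk
        simp only [List.length_cons]
        push_cast
        omega
      · rw [ht] at e4 ⊢
        simp only [List.getLastD_cons, List.length_cons] at e4 ⊢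
        push_cast at e4 ⊢
        omega
    · simp only [pvRun, if_neg h]
      refine ⟨by simp, by intro k; simp; omega, ?_, by simp, ⟨[], rfl⟩⟩
      intro k hk
      simp only [List.length_cons, List.length_nil]
      rcases List.mem_cons.1 hk with rfl | hk2
      · push_cast; omega
      · have := (List.pairwise_cons.1 hp').1 k hk2
        push_cast
        omega

lemma pvGSB_walk_spec : ∀ (n : Nat) (e L : Int) (keys : List Int),
    e ≤ L → (∀ j : Int, e ≤ j → j ≤ L → j ∈ keys) → (L + 1) ∉ keys → L - e ≤ (n : Int) →
    pvGSB_walk keys n e = L := by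
  intro n
  induction n with
  | zero =>
    intro e L keys h1 _ _ h4
    have : e = L := by omega
    simpa [pvGSB_walk] using this
  | succ n ih =>
    intro e L keys h1 h2 h3 h4
    by_cases he : e = L
    · subst he
      simp [pvGSB_walk, if_neg h3]
    · have helt : e < L := lt_of_le_of_ne h1 he
      have hmem : (e + 1) ∈ keys := h2 (e + 1) (by omega) (by omega)
      rw [pvGSB_walk, if_pos hmem]
      exact ih (e + 1) L keys (by omega) (fun j hj1 hj2 => h2 j (by omega) hj2) h3
        (by push_cast at h4 ⊢; omega)

-- ===== VERDICT (by name: the statement is the Claim_ definition above) =====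
lemma pvGSB_main (d : List (Int × Int)) (hne : d ≠ []) (hnd : (d.map Prod.fst).Nodup) :
    get_sequence_boundaries d = get_sequence_boundaries_alt d := by
  have hkeys : (PySem.Dict.mk d).keys = d.map Prod.fst := by simp [PySem.Dict.keys]
  have hof : PySem.Set.ofList (d.map Prod.fst) = d.map Prod.fst :=
    PySem.Set.ofList_eq_self_of_nodup _ hnd
  have hksne : d.map Prod.fst ≠ [] := by simpa using hne
  -- the sorted key list and its structure
  have hperm : (PySem.List.sorted (d.map Prod.fst) (fun v => v) false).Perm (d.map Prod.fst) :=
    PySem.List.sorted_perm _ _ _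
  have hskne : PySem.List.sorted (d.map Prod.fst) (fun v => v) false ≠ [] := by
    intro h0
    exact hksne (by rwa [PySem.List.sorted_eq_nil_iff] at h0)
  obtain ⟨x, rest, hsk⟩ : ∃ x rest, PySem.List.sorted (d.map Prod.fst) (fun v => v) false = x :: rest := by
    cases h0 : PySem.List.sorted (d.map Prod.fst) (fun v => v) false with
    | nil => exact absurd h0 hskne
    | cons a l => exact ⟨a, l, rfl⟩
  have hlt : (x :: rest).Pairwise (· < ·) := by
    have h1 : (x :: rest).Pairwise (· ≤ ·) := by
      have := PySem.List.sorted_pairwise (xs := d.map Prod.fst) (key := fun v => v)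
      rwa [hsk] at this
    have h2 : (x :: rest).Nodup := by
      rw [← hsk]
      exact (hperm.nodup_iff).2 hnd
    exact (h1.and h2).imp (fun h => lt_of_le_of_ne h.1 h.2)
  obtain ⟨e1, e2, e3, e4, t, ht⟩ := pvRun_spec rest x hlt
  have hseq : (pvGSB_aloop rest [] [x] x).1 ++ [(pvGSB_aloop rest [] [x] x).2] =
      (pvRun x rest).1 :: pvRuns (pvRun x rest).2 := by
    simpa using pvGSB_aloop_spec rest [] [] x
  have hmemk : ∀ k : Int, k ∈ d.map Prod.fst ↔ (k ∈ (pvRun x rest).1 ∨ k ∈ (pvRun x rest).2) := by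
    intro k
    rw [← PySem.List.mem_sorted (xs := d.map Prod.fst) (key := fun v => v) (rev := false), hsk, e1]
    simp
  have hrlen : 1 ≤ (pvRun x rest).1.length := by rw [ht]; simp
  -- L = end of the first run
  have hwalk : pvGSB_walk (d.map Prod.fst) (d.map Prod.fst).length x
      = x + ((pvRun x rest).1.length : Int) - 1 := by
    apply pvGSB_walk_spec
    · omega
    · intro j hj1 hj2
      exact (hmemk j).2 (Or.inl ((e2 j).2 ⟨hj1, by omega⟩))
    · intro hbad
      rcases (hmemk _).1 hbad with h | h
      · have := (e2 _).1 h; omega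
      · have := e3 _ h; omega
    · have hlen : (x :: rest).length = (pvRun x rest).1.length + (pvRun x rest).2.length := by
        rw [e1]; simp
      have hlen2 : (d.map Prod.fst).length = (x :: rest).length := by
        rw [← hsk, PySem.List.length_sorted]
      simp only [List.length_cons] at hlen
      have hlen2' : (d.map Prod.fst).length = rest.length + 1 := by
        rw [hlen2]; simp
      omega
  -- min of the keys is the sorted head
  have hmin : PySem.List.min? (d.map Prod.fst) (fun v => v) = some x := by
    cases h0 : PySem.List.min? (d.map Prod.fst) (fun v => v) with
    | none => exact absurd ((PySem.List.min?_eq_none_iff _ _).1 h0) hksne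
    | some m0 =>
      have hm0 : m0 ∈ d.map Prod.fst := PySem.List.min?_mem h0
      have hmin0 : ∀ y ∈ d.map Prod.fst, m0 ≤ y := PySem.List.min?_isMin h0
      have hxle : ∀ y ∈ d.map Prod.fst, x ≤ y := PySem.List.key_head_sorted_le _ _ hsk
      have hxmem : x ∈ d.map Prod.fst := (hmemk x).2 (Or.inl (by rw [ht]; simp))
      exact congrArg some (le_antisymm (hmin0 x hxmem) (hxle m0 hm0))
  -- the filtered tail is exactly the second-run remainder, member-wise
  have hlater : ∀ k : Int, k ∈ (d.map Prod.fst).filter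
      (fun k => decide (x + ((pvRun x rest).1.length : Int) - 1 < k)) ↔ k ∈ (pvRun x rest).2 := by
    intro k
    simp only [List.mem_filter, decide_eq_true_eq, hmemk k]
    constructor
    · rintro ⟨h | h, hgt⟩
      · exact absurd hgt (by have := (e2 k).1 h; omega)
      · exact h
    · intro h
      exact ⟨Or.inr h, by have := e3 k h; omega⟩
  have hremlt : (pvRun x rest).2.Pairwise (· < ·) := by
    rw [e1] at hlt
    exact (List.pairwise_append.1 hlt).2.1
  -- now compute both sides
  simp only [get_sequence_boundaries, get_sequence_boundaries_alt, hkeys, hof, hsk, hmin, hwalk, hseq]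
  cases hrem : (pvRun x rest).2 with
  | nil =>
    have hlat : (d.map Prod.fst).filter
        (fun k => decide (x + ((pvRun x rest).1.length : Int) - 1 < k)) = [] := by
      rw [List.eq_nil_iff_forall_not_mem]
      intro k hk
      have := (hlater k).1 hk
      rw [hrem] at this
      simp at this
    rw [hlat]
    simp only [pvRuns, PySem.List.min?, List.foldl_nil]
    rw [ht]
    rw [ht] at e4
    simp only [List.headD_cons, List.getLastD_cons, Prod.mk.injEq] at e4 ⊢
    refine ⟨?_, ?_⟩
    · split_ifs
      · simp only [List.getLastD_eq_getLast?, List.length_cons] at e4 ⊢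
        rw [e4]
      · rfl
    · rw [if_neg (by norm_num)]
      split_ifs <;> first | rfl | omega
  | cons z zs =>
    obtain ⟨_, _, _, _, tz, htz⟩ := pvRun_spec zs z (by rwa [hrem] at hremlt)
    have hzmin : PySem.List.min? ((d.map Prod.fst).filter
        (fun k => decide (x + ((pvRun x rest).1.length : Int) - 1 < k))) (fun v => v) = some z := by
      cases h0 : PySem.List.min? ((d.map Prod.fst).filter
          (fun k => decide (x + ((pvRun x rest).1.length : Int) - 1 < k))) (fun v => v) with
      | none =>
        have hnil := (PySem.List.min?_eq_none_iff _ _).1 h0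
        have hz2 := (hlater z).2 (show z ∈ (pvRun x rest).2 by rw [hrem]; simp)
        rw [hnil] at hz2
        simp at hz2
      | some w =>
        have hw : w ∈ (pvRun x rest).2 := (hlater w).1 (PySem.List.min?_mem h0)
        have hzlew : z ≤ w := by
          rw [hrem] at hw
          rcases List.mem_cons.1 hw with rfl | hw2
          · exact le_refl _
          · have := (List.pairwise_cons.1 (by rwa [hrem] at hremlt)).1 w hw2
            omega
        have hwlez : w ≤ z :=
          PySem.List.min?_isMin h0 z ((hlater z).2 (by rw [hrem]; simp))
        simpa using le_antisymm hwlez hzlew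
    rw [hzmin]
    simp only [pvRuns, htz]
    rw [ht]
    rw [ht] at e4
    simp only [List.headD_cons, List.getLastD_cons, List.length_cons, Prod.mk.injEq] at e4 ⊢
    refine ⟨?_, ?_⟩
    · split_ifs
      · simp only [List.getLastD_eq_getLast?] at e4 ⊢
        rw [e4]
      · rfl
    · rw [if_pos (by omega)]
      rfl

-- ===== VERDICT (by name: the statement is the Claim_ definition above) =====
theorem get_sequence_boundaries_spec : Claim_equal_get_sequence_boundaries := by
  intro d _ hpre
  exact pvGSB_main d hpre.1 hpre.2
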